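-- pv_equiv track=rewrite | github.com/baronjah/Universal_Being | scriptura_exchange_zone/talking_ragdoll_game/scripts/tools/pentagon_priority_detective.py | _analyze_header_quality
-- ===== SOURCE A (Python) =====
-- def _analyze_header_quality(content: str) -> int:
--     """Analyze header quality - 5+ lines = newer/better"""
--     lines = content.split('\n')
--     header_lines = 0
--
--     for i, line in enumerate(lines[:20]):  # Check first 20 lines
--         line = line.strip()
--         if line.startswith('#') and not line.startswith('##'):
--             header_lines += 1
--         elif line and not line.startswith('#') and 'extends' not in line:
--             break
--
--     # Score: 5+ lines = modern, 3-4 = decent, 1-2 = old, 0 = ancient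
--     if header_lines >= 5:
--         return 100  # Modern, well-documented
--     elif header_lines >= 3:
--         return 75   # Decent documentation
--     elif header_lines >= 1:
--         return 50   # Basic documentation
--     else:
--         return 25   # No documentation
-- ===== SOURCE B (Python) =====
-- def _analyze_header_quality(content: str) -> int:
--     """Two-pass decomposition: find the stop line, slice the header prefix, count, score."""
--     lines = [l.strip() for l in content.split('\n')[:20]]
--     stop = next((i for i, l in enumerate(lines)
--                  if l and not l.startswith('#') and 'extends' not in l),
--                 len(lines))
--     header_lines = sum(1 for l in lines[:stop]
--                        if l.startswith('#') and not l.startswith('##'))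
--     if header_lines >= 5:
--         return 100
--     elif header_lines >= 3:
--         return 75
--     elif header_lines >= 1:
--         return 50
--     else:
--         return 25
-- ===== Notes on version B (the rewrite author's own statement) =====
-- stated objective: alternative
-- what changed: Replaces A's single stateful loop (count-or-break) with a two-pass decomposition: strip all lines once, locate the first stop line by index, then count header comments in the sliced prefix.
import Mathlib
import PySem

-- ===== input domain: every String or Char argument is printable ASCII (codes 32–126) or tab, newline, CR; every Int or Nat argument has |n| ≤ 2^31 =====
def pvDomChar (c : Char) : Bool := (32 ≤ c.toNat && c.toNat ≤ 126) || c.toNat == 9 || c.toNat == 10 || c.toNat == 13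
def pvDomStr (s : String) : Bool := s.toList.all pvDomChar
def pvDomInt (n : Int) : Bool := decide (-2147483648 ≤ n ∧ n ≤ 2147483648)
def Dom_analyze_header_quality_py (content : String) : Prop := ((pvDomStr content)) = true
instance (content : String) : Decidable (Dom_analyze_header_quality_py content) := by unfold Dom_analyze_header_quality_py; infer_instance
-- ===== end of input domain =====

-- B replaces A's single stateful loop (count-or-break) with a two-pass decomposition
-- (strip, find the stop index, slice, count); objective: alternative, same cost.


-- ===== PORT A =====
-- A's for-loop with break, counting in an accumulator; strips each line inside the loop.
def pvLoopA : List (List Char) → Nat → Nat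
  | [], acc => acc
  | l :: rest, acc =>
    let line := PySem.Chars.strip l
    if PySem.Chars.startswith line ['#'] && !PySem.Chars.startswith line ['#', '#'] then
      pvLoopA rest (acc + 1)
    else if !line.isEmpty && !PySem.Chars.startswith line ['#'] &&
            !PySem.Chars.isIn ['e', 'x', 't', 'e', 'n', 'd', 's'] line then
      acc
    else
      pvLoopA rest acc

def analyze_header_quality_py (content : String) : Int :=
  let lines := PySem.Chars.splitOn content.toList ['\n']
  let header_lines := pvLoopA (PySem.List.slice lines none (some 20)) 0
  if header_lines ≥ 5 then 100
  else if header_lines ≥ 3 then 75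
  else if header_lines ≥ 1 then 50
  else 25

-- ===== PORT B =====
-- B: strip the first 20 lines once, find the index of the first stop line, count
-- '#'-but-not-'##' lines in the prefix before it, then score.
def pvStopB (l : List Char) : Bool :=
  !l.isEmpty && !PySem.Chars.startswith l ['#'] &&
    !PySem.Chars.isIn ['e', 'x', 't', 'e', 'n', 'd', 's'] l

def pvHdrB (l : List Char) : Bool :=
  PySem.Chars.startswith l ['#'] && !PySem.Chars.startswith l ['#', '#']

def analyze_header_quality_py_alt (content : String) : Int :=
  let lines := (PySem.List.slice (PySem.Chars.splitOn content.toList ['\n']) none (some 20)).map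
                 PySem.Chars.strip
  let stop := lines.findIdx pvStopB
  let header_lines := ((lines.take stop).filter pvHdrB).length
  if header_lines ≥ 5 then 100
  else if header_lines ≥ 3 then 75
  else if header_lines ≥ 1 then 50
  else 25

-- ===== PRECONDITION & SPEC =====
def Spec_analyze_header_quality_py (content : String) (out : Int) : Prop := out = analyze_header_quality_py_alt content
instance (content : String) (out : Int) : Decidable (Spec_analyze_header_quality_py content out) := by unfold Spec_analyze_header_quality_py; infer_instance

-- ===== CLAIM (what is proved, stated in full; the proofs are below) =====
def Claim_equal_analyze_header_quality_py : Prop := ∀ (content : String), Dom_analyze_header_quality_py content → Spec_analyze_header_quality_py content (analyze_header_quality_py content)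

-- ===== LEMMAS AND PROOFS =====

-- take-up-to-the-first-stop equals takeWhile of the negated predicate
lemma take_findIdx_eq_takeWhile {α : Type} (p : α → Bool) (ls : List α) :
    ls.take (ls.findIdx p) = ls.takeWhile (fun l => !p l) := by
  induction ls with
  | nil => rfl
  | cons l rest ih =>
    by_cases h : p l
    · simp [List.findIdx_cons, h]
    · simp [List.findIdx_cons, h, ih]

-- A's loop computes acc + the count B computes on the stripped prefix
lemma pvLoopA_eq (ls : List (List Char)) (acc : Nat) :
    pvLoopA ls acc =
      acc + (((ls.map PySem.Chars.strip).takeWhile (fun l => !pvStopB l)).filter pvHdrB).length := by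
  induction ls generalizing acc with
  | nil => simp [pvLoopA]
  | cons l rest ih =>
    simp only [pvLoopA, List.map_cons, List.takeWhile_cons]
    cases h1 : PySem.Chars.startswith (PySem.Chars.strip l) ['#'] <;>
      cases h2 : PySem.Chars.startswith (PySem.Chars.strip l) ['#', '#'] <;>
        cases h3 : (PySem.Chars.strip l).isEmpty <;>
          cases h4 : PySem.Chars.isIn ['e', 'x', 't', 'e', 'n', 'd', 's'] (PySem.Chars.strip l) <;>
            simp [pvStopB, pvHdrB, h1, h2, h3, h4, ih] <;> omega

-- ===== VERDICT (by name: the statement is the Claim_ definition above) =====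
theorem analyze_header_quality_py_spec : Claim_equal_analyze_header_quality_py := by
  intro content _
  unfold Spec_analyze_header_quality_py analyze_header_quality_py analyze_header_quality_py_alt
  simp only [pvLoopA_eq, take_findIdx_eq_takeWhile, Nat.zero_add]
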